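-- pv_equiv track=rewrite | github.com/gregpp/python-puzzles | nth_most_rare.py | nth_most_rare
-- ===== SOURCE A (Python) =====
-- def nth_most_rare(elements, n):
--     """
--     :param elements: (list) List of integers.
--     :param n: (int) The n-th element function should return.
--     :returns: (int) The n-th most rare element in the elements list.
--     """
--     s = set(elements)
--     if n > len(s) or n <= 0:
--         print ("N must be a positive integer not great than number\
--                of unique elements in a list")
--         return None
--     d = {}
--
--     for e in elements:
--         if e in d:
--             d[e] += 1
--         else:
--             d[e] = 1
--
--     x = sorted(d.items(),key = lambda x: x[1], reverse = False)
--     #print (x)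
--
--     return x[n-1][0]
-- ===== SOURCE B (Python) =====
-- def nth_most_rare(elements, n):
--     counts = {}
--     for e in elements:
--         counts[e] = counts.get(e, 0) + 1
--     if n > len(counts) or n <= 0:
--         print ("N must be a positive integer not great than number\
--                of unique elements in a list")
--         return None
--     buckets = {}
--     for e, c in counts.items():
--         buckets.setdefault(c, []).append(e)
--     order = []
--     for c in sorted(buckets):
--         order.extend(buckets[c])
--     return order[n - 1]
-- ===== Notes on version B (the rewrite author's own statement) =====
-- stated objective: alternative
-- what changed: B replaces A's stable sort of the (element,count) items by a bucket table mapping each count to its elements in first-occurrence order, concatenated over the sorted distinct counts, and indexes the resulting element list directly.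
import Mathlib
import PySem

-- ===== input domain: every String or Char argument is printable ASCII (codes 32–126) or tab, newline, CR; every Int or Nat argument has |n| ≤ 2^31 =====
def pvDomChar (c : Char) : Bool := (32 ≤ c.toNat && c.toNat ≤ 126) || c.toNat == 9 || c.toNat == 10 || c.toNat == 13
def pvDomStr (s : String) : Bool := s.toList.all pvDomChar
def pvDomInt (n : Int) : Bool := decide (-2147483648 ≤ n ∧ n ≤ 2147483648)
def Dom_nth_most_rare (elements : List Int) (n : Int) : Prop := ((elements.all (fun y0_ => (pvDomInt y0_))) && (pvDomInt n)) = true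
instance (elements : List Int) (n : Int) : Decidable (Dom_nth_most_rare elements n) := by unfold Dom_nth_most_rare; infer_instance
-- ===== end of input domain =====

-- B replaces A's stable sort of the count dict with a bucket table (count -> elements in
-- first-occurrence order) concatenated over ascending counts; objective: alternative.
-- The invalid-n branch prints a message in both Pythons; only the return value is claimed.

-- ===== PORT A =====
def nth_most_rare (elements : List Int) (n : Int) : Option Int :=
  let s := PySem.Set.ofList elements
  if n > (s.length : Int) ∨ n ≤ 0 then
    none
  else
    let d := elements.foldl
      (fun d e => if d.contains e then d.insert e (d.getD e 0 + 1) else d.insert e 1)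
      (PySem.Dict.empty : PySem.Dict Int Int)
    let x := PySem.List.sorted d.items (fun p => p.2) false
    (PySem.List.pyGet? x (n - 1)).map (fun p => p.1)

-- ===== PORT B =====
def nth_most_rare_alt (elements : List Int) (n : Int) : Option Int :=
  let counts := elements.foldl (fun d e => d.insert e (d.getD e 0 + 1)) (PySem.Dict.empty : PySem.Dict Int Int)
  if n > (counts.size : Int) ∨ n ≤ 0 then
    none
  else
    let buckets := counts.items.foldl
      (fun b p => b.modify p.2 [] (fun l => l ++ [p.1])) (PySem.Dict.empty : PySem.Dict Int (List Int))
    let order := (PySem.List.sorted buckets.keys (fun c => c) false).foldl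
      (fun acc c => acc ++ buckets.getD c []) []
    PySem.List.pyGet? order (n - 1)

-- ===== PRECONDITION & SPEC =====
def Spec_nth_most_rare (elements : List Int) (n : Int) (out : Option Int) : Prop := out = nth_most_rare_alt elements n
instance (elements : List Int) (n : Int) (out : Option Int) : Decidable (Spec_nth_most_rare elements n out) := by unfold Spec_nth_most_rare; infer_instance

-- ===== CLAIM (what is proved, stated in full; the proofs are below) =====
def Claim_equal_nth_most_rare : Prop := ∀ (elements : List Int) (n : Int), Dom_nth_most_rare elements n → Spec_nth_most_rare elements n (nth_most_rare elements n)

-- ===== LEMMAS AND PROOFS =====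

-- A's count loop has the same step function as B's, hence builds the same dict (= counter).
lemma a_counts_eq (elements : List Int) :
    elements.foldl
      (fun d e => if d.contains e then d.insert e (d.getD e 0 + 1) else d.insert e 1)
      PySem.Dict.empty = PySem.Dict.counter elements := by
  rw [← PySem.Dict.foldl_insert_getD_add_one_eq_counter]
  congr 1
  funext d e
  by_cases h : d.contains e
  · simp [h]
  · simp only [Bool.not_eq_true] at h
    simp [h, PySem.Dict.getD_of_not_contains d _ h]

-- The bucket table looks up to the (still-ordered) filter of the items by count.
lemma buckets_getD (its : List (Int × Int)) (b : PySem.Dict Int (List Int)) (c : Int) :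
    (its.foldl (fun b p => b.modify p.2 [] (fun l => l ++ [p.1])) b).getD c []
      = b.getD c [] ++ (its.filter (fun p => p.2 == c)).map (fun p => p.1) := by
  induction its generalizing b with
  | nil => simp
  | cons p its ih =>
    simp only [List.foldl_cons, ih, List.filter_cons]
    by_cases h : p.2 = c
    · subst h
      simp [PySem.Dict.getD_modify_self]
    · rw [PySem.Dict.getD_modify_of_ne _ _ _ (Ne.symm h)]
      simp [h]

lemma insertBy_cons {α : Type} (before : α → α → Bool) (x y : α) (ys : List α) :
    PySem.List.insertBy before x (y :: ys)
      = if before x y then x :: y :: ys else y :: PySem.List.insertBy before x ys := rfl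

lemma insertBy_append_before {α : Type} (before : α → α → Bool) (x : α) (l t : List α)
    (hl : ∀ y ∈ l, before x y = false) (ht : ∀ y ∈ t, before x y = true) :
    PySem.List.insertBy before x (l ++ t) = l ++ x :: t := by
  induction l with
  | nil =>
    cases t with
    | nil => rfl
    | cons h r => rw [List.nil_append, insertBy_cons, if_pos (ht h (by simp))]; rfl
  | cons a l ih =>
    rw [List.cons_append, insertBy_cons, if_neg (by simp [hl a (by simp)]),
        ih (fun y hy => hl y (by simp [hy])), List.cons_append]

lemma insertBy_append_skip {α : Type} (before : α → α → Bool) (x : α) (l t : List α)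
    (hl : ∀ y ∈ l, before x y = false) :
    PySem.List.insertBy before x (l ++ t) = l ++ PySem.List.insertBy before x t := by
  induction l with
  | nil => simp
  | cons a l ih =>
    rw [List.cons_append, insertBy_cons, if_neg (by simp [hl a (by simp)]),
        ih (fun y hy => hl y (by simp [hy])), List.cons_append]

-- Inserting x (stably, by count) into a bucket concatenation appends x to its own bucket.
lemma insertBy_flatMap (cs : List Int) (hcs : cs.Pairwise (· < ·)) (x : Int × Int)
    (hx : x.2 ∈ cs) (g : Int → List (Int × Int)) (hg : ∀ c ∈ cs, ∀ p ∈ g c, p.2 = c) :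
    PySem.List.insertBy (fun a b => decide (a.2 < b.2)) x (cs.flatMap g)
      = cs.flatMap (fun c => g c ++ if x.2 == c then [x] else []) := by
  induction cs with
  | nil => cases hx
  | cons c cs ih =>
    have hlt : ∀ c' ∈ cs, c < c' := fun c' h => (List.pairwise_cons.mp hcs).1 c' h
    by_cases hxc : x.2 = c
    · -- x belongs to the head bucket: it goes after g c, before all later buckets
      simp only [List.flatMap_cons]
      rw [insertBy_append_before _ _ _ _
          (fun y hy => by simp [hg c (by simp) y hy, hxc])
          (fun y hy => by
            rcases List.mem_flatMap.mp hy with ⟨c', hc', hyc'⟩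
            have := hg c' (by simp [hc']) y hyc'
            simp [this, hxc, hlt c' hc'])]
      have h2 : cs.flatMap (fun c' => g c' ++ if x.2 == c' then [x] else []) = cs.flatMap g := by
        apply List.flatMap_congr
        intro c' hc'
        have : ¬ (x.2 = c') := by have := hlt c' hc'; omega
        simp [this]
      rw [h2]
      simp [hxc]
    · -- x belongs to a later bucket: skip g c and recurse
      have hx' : x.2 ∈ cs := by cases hx with
        | head => exact absurd rfl hxc
        | tail _ h => exact h
      simp only [List.flatMap_cons]
      rw [insertBy_append_skip _ _ _ _
          (fun y hy => by
            have hyc := hg c (by simp) y hy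
            have : c < x.2 := hlt _ hx'
            simp [hyc]; omega)]
      rw [ih (List.pairwise_cons.mp hcs).2 hx' (fun c' hc' => hg c' (by simp [hc']))]
      simp [hxc]

-- The stable sort by count IS the concatenation of the count buckets in ascending order.
lemma sorted_eq_flatMap_filter (cs : List Int) (hcs : cs.Pairwise (· < ·))
    (its : List (Int × Int)) (hmem : ∀ p ∈ its, p.2 ∈ cs) :
    PySem.List.sorted its (fun p => p.2) false
      = cs.flatMap (fun c => its.filter (fun p => p.2 == c)) := by
  induction its using List.reverseRecOn with
  | nil =>
    rw [show (PySem.List.sorted ([] : List (Int × Int)) (fun p => p.2) false) = [] from rfl]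
    simp
  | append_singleton its x ih =>
    rw [PySem.List.sorted_eq_foldl_insertBy, List.foldl_append, ← PySem.List.sorted_eq_foldl_insertBy,
        ih (fun p hp => hmem p (by simp [hp]))]
    simp only [List.foldl_cons, List.foldl_nil]
    rw [insertBy_flatMap cs hcs x (hmem x (by simp))
        (fun c => its.filter (fun p => p.2 == c))
        (fun c _ p hp => by have := (List.mem_filter.mp hp).2; simpa using this)]
    apply List.flatMap_congr
    intro c _
    rw [List.filter_append]
    by_cases h : x.2 = c <;> simp [h]

lemma pyGet?_map {α β : Type} (f : α → β) (xs : List α) (i : Int) :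
    PySem.List.pyGet? (xs.map f) i = (PySem.List.pyGet? xs i).map f := by
  simp [PySem.List.pyGet?]

-- ===== VERDICT (by name: the statement is the Claim_ definition above) =====
theorem nth_most_rare_spec : Claim_equal_nth_most_rare := by
  intro elements n _
  unfold Spec_nth_most_rare nth_most_rare nth_most_rare_alt
  dsimp only
  rw [a_counts_eq]
  simp only [PySem.Dict.foldl_insert_getD_add_one_eq_counter]
  simp only [PySem.Dict.size, PySem.Dict.items_counter]
  set ks := PySem.Set.ofList elements with hks
  simp only [List.length_map]
  split
  · rfl
  · -- main branch
    set its : List (Int × Int) := ks.map (fun k => (k, (elements.count k : Int))) with hits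
    set buckets := its.foldl (fun b p => b.modify p.2 [] (fun l => l ++ [p.1]))
      PySem.Dict.empty with hbuck
    set cs := PySem.List.sorted buckets.keys (fun c => c) false with hcs
    have hkeys : buckets.keys = PySem.Set.ofList (its.map (fun p => p.2)) := by
      rw [hbuck]
      have := PySem.Dict.keys_foldl_modify_key its (fun p => p.2) ([] : List Int)
        (fun _ p => fun l => l ++ [p.1]) PySem.Dict.empty
      simpa [PySem.Set.update, PySem.Set.ofList] using this
    have hnodup : cs.Nodup := by
      refine (PySem.List.sorted_perm buckets.keys (fun c => c) false).nodup_iff.mpr ?_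
      rw [hkeys]; exact PySem.Set.nodup_ofList _
    have hpw : cs.Pairwise (· < ·) := by
      have hle : cs.Pairwise (fun a b => a ≤ b) := PySem.List.sorted_pairwise buckets.keys (fun c => c)
      exact (hle.and hnodup).imp (fun h => lt_of_le_of_ne h.1 h.2)
    have hmem : ∀ p ∈ its, p.2 ∈ cs := by
      intro p hp
      rw [hcs, PySem.List.mem_sorted, hkeys, PySem.Set.mem_ofList]
      exact List.mem_map.mpr ⟨p, hp, rfl⟩
    rw [sorted_eq_flatMap_filter cs hpw its hmem,
        PySem.List.foldl_append_eq_flatMap, List.nil_append]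
    have : (cs.flatMap fun c => buckets.getD c [])
        = (cs.flatMap fun c => its.filter (fun p => p.2 == c)).map (fun p => p.1) := by
      rw [List.map_flatMap]
      apply List.flatMap_congr
      intro c _
      rw [hbuck, buckets_getD]
      simp
    rw [this, pyGet?_map]
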